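-- pv_equiv track=rewrite | github.com/PBelle451/AnalisadoresPython | balls_resolved.py | min_moves_to_alternate
-- ===== SOURCE A (Python) =====
-- def min_moves_to_alternate(buckets):
--     # Extract the indices of all the balls ("B")
--     ball_positions = [i for i, bucket in enumerate(buckets) if bucket == 'B']
--     total_balls = len(ball_positions)
--
--     # If there are no balls or only one ball, it's already correct
--     if total_balls <= 1:
--         return 0
--
--     # Check if the sequence is already correct (distance between each ball is 2)
--     is_correct = all(ball_positions[i] + 2 == ball_positions[i + 1] for i in range(total_balls - 1))
--     if is_correct:
--         return 0
--
--     # If there aren't enough empty spaces to place all balls in an alternating pattern, return -1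
--     required_length = 2 * (total_balls - 1) + 1
--     if len(buckets) < required_length:
--         return -1
--
--     # Try different starting positions for an alternating pattern
--     min_moves = float('inf')
--     for start in range(len(buckets) - 2 * (total_balls - 1)):
--         # Calculate the target positions for an alternating sequence starting from 'start'
--         target_positions = [start + 2 * i for i in range(total_balls)]
--         # Calculate the moves required to match the current ball positions with the target positions
--         moves = sum(abs(ball_positions[i] - target_positions[i]) for i in range(total_balls))
--         min_moves = min(min_moves, moves)
--
--     # Return the minimum number of moves if found, otherwise return -1
--     return min_moves if min_moves != float('inf') else -1
-- ===== SOURCE B (Python) =====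
-- def min_moves_to_alternate(buckets):
--     ball_positions = [i for i, bucket in enumerate(buckets) if bucket == 'B']
--     total_balls = len(ball_positions)
--     if total_balls <= 1:
--         return 0
--     if all(ball_positions[i] + 2 == ball_positions[i + 1] for i in range(total_balls - 1)):
--         return 0
--     if len(buckets) < 2 * (total_balls - 1) + 1:
--         return -1
--     # cost(start) = sum |d_i - start| with d_i = p_i - 2i is convex in start:
--     # it is minimized at the median of d, clamped to the feasible start interval.
--     d = sorted(p - 2 * i for i, p in enumerate(ball_positions))
--     hi = len(buckets) - 2 * (total_balls - 1) - 1
--     m = min(max(d[total_balls // 2], 0), hi)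
--     return sum(abs(x - m) for x in d)
-- ===== Notes on version B (the rewrite author's own statement) =====
-- stated objective: alternative
-- what changed: B replaces A's scan over every feasible start position (each recomputing a cost sum over all balls) with a closed form: the cost as a function of the start is a convex sum of absolute deviations p_i - 2i, so it is minimized at their median clamped to the feasible start interval.
import Mathlib
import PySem

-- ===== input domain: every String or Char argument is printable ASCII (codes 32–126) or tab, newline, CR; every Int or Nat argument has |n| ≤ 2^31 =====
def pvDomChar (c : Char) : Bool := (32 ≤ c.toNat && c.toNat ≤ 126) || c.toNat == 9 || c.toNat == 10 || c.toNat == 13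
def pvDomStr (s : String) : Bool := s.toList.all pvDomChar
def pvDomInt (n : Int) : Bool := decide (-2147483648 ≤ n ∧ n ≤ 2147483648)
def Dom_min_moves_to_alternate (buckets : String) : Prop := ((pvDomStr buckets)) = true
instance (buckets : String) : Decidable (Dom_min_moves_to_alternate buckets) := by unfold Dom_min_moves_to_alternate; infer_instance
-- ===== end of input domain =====

-- B replaces A's scan over every feasible start (computing a fresh cost sum per start)
-- by the closed-form minimiser of the convex cost: the median of the deviations p_i - 2i,
-- clamped to the feasible start interval — objective: alternative.

-- ===== PORT A =====
def min_moves_to_alternate (buckets : String) : Int :=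
  let ball_positions : List Int :=
    ((PySem.List.enumerate buckets.toList).filter (fun p => p.2 == 'B')).map (fun p => p.1)
  let total_balls := ball_positions.length
  if total_balls ≤ 1 then 0
  else
    let is_correct := (List.range (total_balls - 1)).all
      (fun i => ball_positions.getD i 0 + 2 == ball_positions.getD (i + 1) 0)
    if is_correct then 0
    else
      let required_length := 2 * (total_balls - 1) + 1
      if buckets.toList.length < required_length then -1
      else
        let min_moves := (List.range (buckets.toList.length - 2 * (total_balls - 1))).foldl
          (fun acc (start : Nat) =>
            let target_positions := (List.range total_balls).map (fun (i : Nat) => ((start : Int) + 2 * (i : Int)))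
            let moves := ((List.range total_balls).map
              (fun (i : Nat) => |ball_positions.getD i 0 - target_positions.getD i 0|)).sum
            match acc with
            | none => some moves
            | some v => some (min v moves)) (none : Option Int)
        match min_moves with
        | some v => v
        | none => -1

-- ===== PORT B =====
def min_moves_to_alternate_alt (buckets : String) : Int :=
  let ball_positions : List Int :=
    ((PySem.List.enumerate buckets.toList).filter (fun p => p.2 == 'B')).map (fun p => p.1)
  let total_balls := ball_positions.length
  if total_balls ≤ 1 then 0
  else if (List.range (total_balls - 1)).all
      (fun i => ball_positions.getD i 0 + 2 == ball_positions.getD (i + 1) 0) then 0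
  else if buckets.toList.length < 2 * (total_balls - 1) + 1 then -1
  else
    let d := PySem.List.sorted ((PySem.List.enumerate ball_positions).map (fun p => p.2 - 2 * p.1)) (fun x => x) false
    let hi : Int := (buckets.toList.length : Int) - 2 * ((total_balls : Int) - 1) - 1
    let m := min (max (d.getD (total_balls / 2) 0) 0) hi
    (d.map (fun x => |x - m|)).sum

-- ===== PRECONDITION & SPEC =====
def Spec_min_moves_to_alternate (buckets : String) (out : Int) : Prop := out = min_moves_to_alternate_alt buckets
instance (buckets : String) (out : Int) : Decidable (Spec_min_moves_to_alternate buckets out) := by unfold Spec_min_moves_to_alternate; infer_instance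

-- ===== CLAIM (what is proved, stated in full; the proofs are below) =====
def Claim_equal_min_moves_to_alternate : Prop := ∀ (buckets : String), Dom_min_moves_to_alternate buckets → Spec_min_moves_to_alternate buckets (min_moves_to_alternate buckets)

-- ===== LEMMAS AND PROOFS =====

-- cost of choosing start s: total moves to shift deviations l onto s
def pvCost (l : List Int) (s : Int) : Int := (l.map (fun x => |x - s|)).sum
-- number of deviations ≤ s
def pvCnt (l : List Int) (s : Int) : Nat := l.countP (fun x => decide (x ≤ s))

theorem pvAbs_step (a s : Int) : |a - (s + 1)| = |a - s| + (if a ≤ s then 1 else -1) := by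
  rcases abs_cases (a - (s + 1)) with ⟨h1, h2⟩ | ⟨h1, h2⟩ <;>
    rcases abs_cases (a - s) with ⟨h3, h4⟩ | ⟨h3, h4⟩ <;> split_ifs <;> omega

theorem pvCost_succ (l : List Int) (s : Int) :
    pvCost l (s + 1) = pvCost l s + 2 * (pvCnt l s : Int) - l.length := by
  induction l with
  | nil => simp [pvCost, pvCnt]
  | cons a t ih =>
    simp only [pvCost, List.map_cons, List.sum_cons] at ih ⊢
    rw [pvAbs_step, ih]
    simp only [pvCnt, List.countP_cons, List.length_cons]
    by_cases h : a ≤ s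
    · rw [if_pos h, if_pos (by simpa using h)]
      push_cast; ring
    · rw [if_neg h, if_neg (by simpa using h)]
      push_cast; ring

theorem pvCnt_mono (l : List Int) {s t : Int} (h : s ≤ t) : pvCnt l s ≤ pvCnt l t := by
  exact List.countP_mono_left (fun x _ hx => by simp at hx ⊢; omega)

theorem pvCost_mono_right (l : List Int) (m : Int)
    (hm : (l.length : Int) + 1 ≤ 2 * (pvCnt l m : Int)) :
    ∀ (n : Nat) (a : Int), m ≤ a → pvCost l a ≤ pvCost l (a + n) := by
  intro n
  induction n with
  | zero => intro a _; simp
  | succ n ih =>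
    intro a ha
    have h1 : pvCost l a ≤ pvCost l (a + n) := ih a ha
    have h2 : pvCost l (a + n + 1) = pvCost l (a + n) + 2 * (pvCnt l (a + n) : Int) - l.length :=
      pvCost_succ l (a + n)
    have h3 : pvCnt l m ≤ pvCnt l (a + n) := pvCnt_mono l (by omega)
    have : (a : Int) + (n + 1 : Nat) = a + n + 1 := by push_cast; ring
    rw [this, h2]
    omega

theorem pvCost_le_right (l : List Int) (m a b : Int)
    (hm : (l.length : Int) + 1 ≤ 2 * (pvCnt l m : Int)) (hma : m ≤ a) (hab : a ≤ b) :
    pvCost l a ≤ pvCost l b := by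
  have := pvCost_mono_right l m hm (b - a).toNat a hma
  rwa [show a + ((b - a).toNat : Int) = b by omega] at this

theorem pvCost_mono_left (l : List Int) (m : Int)
    (hl : ∀ s : Int, s < m → 2 * (pvCnt l s : Int) ≤ l.length) :
    ∀ (n : Nat) (a : Int), a + n ≤ m → pvCost l (a + n) ≤ pvCost l a := by
  intro n
  induction n with
  | zero => intro a _; simp
  | succ n ih =>
    intro a ha
    have han : a + (n : Int) < m := by push_cast at ha ⊢; omega
    have h1 : pvCost l (a + n) ≤ pvCost l a := ih a (by omega)
    have h2 : pvCost l (a + n + 1) = pvCost l (a + n) + 2 * (pvCnt l (a + n) : Int) - l.length :=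
      pvCost_succ l (a + n)
    have h3 := hl (a + n) han
    have : (a : Int) + (n + 1 : Nat) = a + n + 1 := by push_cast; ring
    rw [this, h2]
    omega

theorem pvCost_le_left (l : List Int) (m a b : Int)
    (hl : ∀ s : Int, s < m → 2 * (pvCnt l s : Int) ≤ l.length) (hab : a ≤ b) (hbm : b ≤ m) :
    pvCost l b ≤ pvCost l a := by
  have := pvCost_mono_left l m hl (b - a).toNat a
  rw [show a + ((b - a).toNat : Int) = b by omega] at this
  exact this hbm

-- in a sorted list, at least i+1 elements are ≤ the element at index i
theorem pvSorted_cnt_ge (d : List Int) (hs : d.Pairwise (· ≤ ·)) :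
    ∀ i : Nat, i < d.length → i + 1 ≤ pvCnt d (d.getD i 0) := by
  induction d with
  | nil => intro i hi; simp at hi
  | cons a t ih =>
    rcases List.pairwise_cons.mp hs with ⟨ha, ht⟩
    intro i hi
    cases i with
    | zero =>
      simp only [pvCnt, List.countP_cons, List.getD_cons_zero]
      simp
    | succ i =>
      have hit : i < t.length := by simpa using hi
      have hmem : t.getD i 0 ∈ t := by
        rw [List.getD_eq_getElem t 0 hit]; exact List.getElem_mem hit
      have ham : a ≤ t.getD i 0 := ha _ hmem
      have hih := ih ht i hit
      simp only [pvCnt, List.getD_cons_succ, List.countP_cons] at hih ⊢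
      rw [if_pos (by simpa using ham)]
      omega

-- in a sorted list, if s is below the element at index i, at most i elements are ≤ s
theorem pvSorted_cnt_le (d : List Int) (hs : d.Pairwise (· ≤ ·)) :
    ∀ (i : Nat), i < d.length → ∀ s : Int, s < d.getD i 0 → pvCnt d s ≤ i := by
  induction d with
  | nil => intro i hi; simp at hi
  | cons a t ih =>
    rcases List.pairwise_cons.mp hs with ⟨ha, ht⟩
    intro i hi s hsi
    cases i with
    | zero =>
      simp only [List.getD_cons_zero] at hsi
      have : pvCnt (a :: t) s = 0 := by
        simp only [pvCnt, List.countP_eq_zero]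
        intro x hx
        simp only [List.mem_cons] at hx
        rcases hx with rfl | hx
        · simp; omega
        · have := ha x hx; simp; omega
      omega
    | succ i =>
      have hit : i < t.length := by simpa using hi
      simp only [List.getD_cons_succ] at hsi
      have hih := ih ht i hit s hsi
      simp only [pvCnt, List.countP_cons] at hih ⊢
      split_ifs <;> omega

theorem pvClamp (l : List Int) (m hi : Int)
    (hm : (l.length : Int) + 1 ≤ 2 * (pvCnt l m : Int))
    (hlt : ∀ s : Int, s < m → 2 * (pvCnt l s : Int) ≤ l.length)
    (hhi : 0 ≤ hi) :
    ∀ s : Int, 0 ≤ s → s ≤ hi → pvCost l (min (max m 0) hi) ≤ pvCost l s := by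
  intro s h0 hshi
  rcases le_or_gt m 0 with hm0 | hm0
  · rw [max_eq_right hm0, min_eq_left hhi]
    exact pvCost_le_right l m 0 s hm (by omega) h0
  · rw [max_eq_left (by omega)]
    rcases le_or_gt m hi with hmhi | hmhi
    · rw [min_eq_left hmhi]
      rcases le_or_gt m s with h | h
      · exact pvCost_le_right l m m s hm le_rfl h
      · exact pvCost_le_left l m s m hlt (by omega) le_rfl
    · rw [min_eq_right (by omega)]
      exact pvCost_le_left l m s hi hlt hshi (by omega)

-- A's running-minimum loop, once the accumulator is some v
theorem pvFoldl_some (f : Nat → Int) :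
    ∀ (l : List Nat) (v : Int),
      l.foldl (fun acc s => match acc with
        | none => some (f s)
        | some v => some (min v (f s))) (some v)
      = some (l.foldl (fun v s => min v (f s)) v) := by
  intro l
  induction l with
  | nil => intro v; rfl
  | cons s t ih => intro v; simpa using ih (min v (f s))

theorem pvFoldl_min_le (f : Nat → Int) :
    ∀ (l : List Nat) (v : Int),
      l.foldl (fun v s => min v (f s)) v ≤ v ∧
      ∀ s ∈ l, l.foldl (fun v s => min v (f s)) v ≤ f s := by
  intro l
  induction l with
  | nil => intro v; simp
  | cons a t ih =>
    intro v
    rcases ih (min v (f a)) with ⟨h1, h2⟩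
    refine ⟨by simpa using le_trans h1 (min_le_left _ _), ?_⟩
    intro s hs
    rcases List.mem_cons.mp hs with rfl | hs
    · simpa using le_trans h1 (min_le_right _ _)
    · simpa using h2 s hs

theorem pvFoldl_min_cases (f : Nat → Int) :
    ∀ (l : List Nat) (v : Int),
      l.foldl (fun v s => min v (f s)) v = v ∨
      ∃ s ∈ l, l.foldl (fun v s => min v (f s)) v = f s := by
  intro l
  induction l with
  | nil => intro v; simp
  | cons a t ih =>
    intro v
    rcases ih (min v (f a)) with h | ⟨s, hs, h⟩
    · rcases min_cases v (f a) with ⟨he, _⟩ | ⟨he, _⟩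
      · left; simpa [he] using h
      · right; exact ⟨a, by simp, by simpa [he] using h⟩
    · right; exact ⟨s, by simp [hs], by simpa using h⟩

-- a sum over enumerate as a sum over indices
theorem pvEnum_sum (H : Int → Int → Int) :
    ∀ (l : List Int) (s0 : Int),
      ((PySem.List.enumerate l s0).map (fun p => H p.1 p.2)).sum
      = ((List.range l.length).map (fun (i : Nat) => H (s0 + (i : Int)) (l.getD i 0))).sum := by
  intro l
  induction l with
  | nil => intro s0; simp [PySem.List.enumerate_nil]
  | cons a t ih =>
    intro s0
    rw [PySem.List.enumerate_cons, List.map_cons, List.sum_cons, ih (s0 + 1)]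
    rw [List.length_cons, List.range_succ_eq_map, List.map_cons, List.sum_cons, List.map_map]
    simp only [List.getD_cons_zero, Nat.cast_zero, add_zero, Function.comp_def,
      List.getD_cons_succ]
    congr 2
    apply List.map_congr_left
    intro i _
    congr 1
    push_cast
    ring

-- ===== VERDICT (by name: the statement is the Claim_ definition above) =====
theorem min_moves_to_alternate_spec : Claim_equal_min_moves_to_alternate := by
  intro buckets _
  unfold Spec_min_moves_to_alternate
  simp only [min_moves_to_alternate, min_moves_to_alternate_alt]
  generalize (((PySem.List.enumerate buckets.toList).filter (fun p => p.2 == 'B')).map (fun p => p.1) : List Int) = pos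
  generalize buckets.toList.length = L
  split_ifs with h1 h2 h3
  · rfl
  · rfl
  · rfl
  have hk : 2 ≤ pos.length := by omega
  set dexp : List Int := (PySem.List.enumerate pos).map (fun p => p.2 - 2 * p.1) with hdexp
  set d : List Int := PySem.List.sorted dexp (fun x => x) false with hd
  have hperm : d.Perm dexp := PySem.List.sorted_perm dexp (fun x => x) false
  have hlexp : dexp.length = pos.length := by
    rw [hdexp, List.length_map, PySem.List.length_enumerate]
  have hlend : d.length = pos.length := by rw [hperm.length_eq, hlexp]
  have hpair : d.Pairwise (· ≤ ·) := PySem.List.sorted_pairwise dexp (fun x => x)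
  set m : Int := d.getD (pos.length / 2) 0 with hm
  have hidx : pos.length / 2 < d.length := by omega
  have hcntge := pvSorted_cnt_ge d hpair (pos.length / 2) hidx
  have hA : (d.length : Int) + 1 ≤ 2 * (pvCnt d m : Int) := by
    rw [← hm] at hcntge
    omega
  have hB : ∀ s : Int, s < m → 2 * (pvCnt d s : Int) ≤ (d.length : Int) := by
    intro s hs
    have := pvSorted_cnt_le d hpair (pos.length / 2) hidx s (hm ▸ hs)
    omega
  set hi : Int := (L : Int) - 2 * ((pos.length : Int) - 1) - 1 with hhi
  set N : Nat := L - 2 * (pos.length - 1) with hN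
  have hhiN : hi = (N : Int) - 1 := by omega
  have hhi0 : 0 ≤ hi := by omega
  have hmoves : ∀ s : Nat,
      (List.map (fun (i : Nat) => |pos.getD i 0 -
          (List.map (fun (i : Nat) => ((s : Int) + 2 * (i : Int))) (List.range pos.length)).getD i 0|)
        (List.range pos.length)).sum
      = pvCost d (s : Int) := by
    intro s
    have e1 : (List.map (fun (i : Nat) => |pos.getD i 0 -
          (List.map (fun (i : Nat) => ((s : Int) + 2 * (i : Int))) (List.range pos.length)).getD i 0|)
        (List.range pos.length))
        = (List.map (fun (i : Nat) => |pos.getD i 0 - 2 * ((0 : Int) + (i : Int)) - (s : Int)|)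
            (List.range pos.length)) := by
      apply List.map_congr_left
      intro i hi2
      rw [PySem.List.getD_map_range _ _ _ _ (List.mem_range.mp hi2)]
      congr 1
      ring
    rw [e1]
    rw [← pvEnum_sum (fun idx v => |v - 2 * idx - (s : Int)|) pos 0]
    have e4 : pvCost d (s : Int) = pvCost dexp (s : Int) := by
      rw [pvCost, pvCost]; exact (hperm.map _).sum_eq
    rw [e4, pvCost, hdexp, List.map_map]
    rfl
  simp only [hmoves]
  obtain ⟨s0, rest, hsr⟩ : ∃ s0 rest, List.range N = s0 :: rest := by
    cases hc : List.range N with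
    | nil => exact absurd (List.range_eq_nil.mp hc) (by omega)
    | cons a b => exact ⟨a, b, rfl⟩
  rw [hsr]
  simp only [List.foldl_cons]
  rw [pvFoldl_some (fun s : Nat => pvCost d (s : Int)) rest (pvCost d (s0 : Int))]
  simp only []
  have hRHS : (List.map (fun x => |x - min (max m 0) hi|) d).sum
      = pvCost d (min (max m 0) hi) := rfl
  rw [hRHS]
  have hclamp := pvClamp d m hi hA hB hhi0
  have hmc0 : 0 ≤ min (max m 0) hi := le_min (le_max_right _ _) hhi0
  have hmchi : min (max m 0) hi ≤ hi := min_le_right _ _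
  have hs0N : s0 < N := List.mem_range.mp (hsr ▸ List.mem_cons_self)
  apply le_antisymm
  · have hcast : (((min (max m 0) hi).toNat : Nat) : Int) = min (max m 0) hi := by omega
    have htN : (min (max m 0) hi).toNat ∈ List.range N := List.mem_range.mpr (by omega)
    rw [hsr] at htN
    rcases List.mem_cons.mp htN with he | he
    · have h := (pvFoldl_min_le (fun s : Nat => pvCost d (s : Int)) rest (pvCost d (s0 : Int))).1
      calc List.foldl (fun v (s : Nat) => min v (pvCost d (s : Int))) (pvCost d (s0 : Int)) rest
          ≤ pvCost d (s0 : Int) := h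
        _ = pvCost d (min (max m 0) hi) := by rw [← he, hcast]
    · have h := (pvFoldl_min_le (fun s : Nat => pvCost d (s : Int)) rest (pvCost d (s0 : Int))).2
        _ he
      rwa [hcast] at h
  · rcases pvFoldl_min_cases (fun s : Nat => pvCost d (s : Int)) rest (pvCost d (s0 : Int))
      with hcase | ⟨s, hsmem, hcase⟩
    · rw [hcase]
      exact hclamp _ (by positivity) (by omega)
    · rw [hcase]
      have hsN : s < N := List.mem_range.mp (hsr ▸ List.mem_cons_of_mem _ hsmem)
      exact hclamp _ (by positivity) (by omega)
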